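-- pv_equiv track=rewrite | github.com/ryrobes/larsql | windlass/windlass/server/postgres_server.py | _is_catalog_query
-- ===== SOURCE A (Python) =====
-- def _is_catalog_query(query: str) -> bool:
--     """
--     Check if query is a PostgreSQL catalog query.
--
--     DBeaver and other clients query pg_catalog, information_schema, pg_class, etc.
--     to get metadata (tables, columns, types).
--
--     Returns:
--         True if this is a catalog/metadata query
--     """
--     query_upper = query.upper()
--
--     # Common catalog patterns
--     catalog_indicators = [
--         'PG_CATALOG',
--         'PG_CLASS',
--         'PG_NAMESPACE',
--         'PG_TYPE',
--         'PG_ATTRIBUTE',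
--         'PG_INDEX',
--         'PG_DATABASE',
--         'PG_TABLES',
--         'PG_PROC',
--         'PG_DESCRIPTION',
--         'PG_SETTINGS',
--         'INFORMATION_SCHEMA',
--         '::REGCLASS',  # PostgreSQL type casting
--         '::REGPROC',
--         '::REGTYPE',
--         '::OID',
--         'CURRENT_SCHEMA',
--         'CURRENT_DATABASE',
--         'VERSION()',
--         'HAS_TABLE_PRIVILEGE',
--         'HAS_SCHEMA_PRIVILEGE'
--     ]
--
--     return any(indicator in query_upper for indicator in catalog_indicators)
-- ===== SOURCE B (Python) =====
-- # Dispatch on the first character: indicators grouped by their leading char,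
-- # one pass over the uppercased query testing only the matching group's tails.
-- _TAILS_BY_FIRST = {
--     'P': ['G_CATALOG', 'G_CLASS', 'G_NAMESPACE', 'G_TYPE', 'G_ATTRIBUTE',
--           'G_INDEX', 'G_DATABASE', 'G_TABLES', 'G_PROC', 'G_DESCRIPTION',
--           'G_SETTINGS'],
--     'I': ['NFORMATION_SCHEMA'],
--     ':': [':REGCLASS', ':REGPROC', ':REGTYPE', ':OID'],
--     'C': ['URRENT_SCHEMA', 'URRENT_DATABASE'],
--     'V': ['ERSION()'],
--     'H': ['AS_TABLE_PRIVILEGE', 'AS_SCHEMA_PRIVILEGE'],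
-- }
--
--
-- def _is_catalog_query(query: str) -> bool:
--     u = query.upper()
--     for i, c in enumerate(u):
--         tails = _TAILS_BY_FIRST.get(c)
--         if tails is not None and any(u.startswith(t, i + 1) for t in tails):
--             return True
--     return False
-- ===== Notes on version B (the rewrite author's own statement) =====
-- stated objective: alternative
-- what changed: Replaces 21 independent full-string substring scans by a single left-to-right pass that dispatches on the current character through a dict of indicator tails grouped by first letter, so only the (at most one) matching group is tested at each position.
import Mathlib
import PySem

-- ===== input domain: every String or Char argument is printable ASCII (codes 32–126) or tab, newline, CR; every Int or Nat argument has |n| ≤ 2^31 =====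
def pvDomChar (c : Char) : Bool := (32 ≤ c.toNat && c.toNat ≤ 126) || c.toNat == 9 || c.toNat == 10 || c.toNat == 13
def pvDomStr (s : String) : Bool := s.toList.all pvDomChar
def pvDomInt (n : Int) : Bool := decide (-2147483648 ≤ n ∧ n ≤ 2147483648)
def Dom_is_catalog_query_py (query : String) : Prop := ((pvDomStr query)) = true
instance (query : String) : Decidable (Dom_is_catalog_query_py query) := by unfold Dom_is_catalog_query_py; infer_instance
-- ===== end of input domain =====

-- B replaces the 21 independent full substring scans by one left-to-right pass that
-- dispatches on the current character through a table of indicator tails grouped by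
-- first letter; same return value.

-- ===== PORT A =====
def pvCatalogIndicators : List String :=
  ["PG_CATALOG", "PG_CLASS", "PG_NAMESPACE", "PG_TYPE", "PG_ATTRIBUTE",
   "PG_INDEX", "PG_DATABASE", "PG_TABLES", "PG_PROC", "PG_DESCRIPTION",
   "PG_SETTINGS", "INFORMATION_SCHEMA", "::REGCLASS", "::REGPROC",
   "::REGTYPE", "::OID", "CURRENT_SCHEMA", "CURRENT_DATABASE", "VERSION()",
   "HAS_TABLE_PRIVILEGE", "HAS_SCHEMA_PRIVILEGE"]

def is_catalog_query_py (query : String) : Bool :=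
  let query_upper := PySem.Str.upper query
  pvCatalogIndicators.any (fun indicator => PySem.Str.isIn indicator query_upper)

-- ===== PORT B =====
-- _TAILS_BY_FIRST: indicator tails keyed by leading character
def pvTailsByFirst : List (Char × List (List Char)) :=
  [('P', ["G_CATALOG", "G_CLASS", "G_NAMESPACE", "G_TYPE", "G_ATTRIBUTE",
          "G_INDEX", "G_DATABASE", "G_TABLES", "G_PROC", "G_DESCRIPTION",
          "G_SETTINGS"].map String.toList),
   ('I', ["NFORMATION_SCHEMA"].map String.toList),
   (':', [":REGCLASS", ":REGPROC", ":REGTYPE", ":OID"].map String.toList),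
   ('C', ["URRENT_SCHEMA", "URRENT_DATABASE"].map String.toList),
   ('V', ["ERSION()"].map String.toList),
   ('H', ["AS_TABLE_PRIVILEGE", "AS_SCHEMA_PRIVILEGE"].map String.toList)]

-- the 'for i, c in enumerate(u)' loop as structural recursion over the suffixes of u;
-- u.startswith(t, i+1) = startswith on the suffix after c
def pvScanB : List Char → Bool
  | [] => false
  | c :: rest =>
    match pvTailsByFirst.lookup c with
    | some tails =>
      if tails.any (fun t => PySem.Chars.startswith rest t) then true else pvScanB rest
    | none => pvScanB rest

def is_catalog_query_py_alt (query : String) : Bool :=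
  let u := PySem.Str.upper query
  pvScanB u.toList

-- ===== PRECONDITION & SPEC =====
def Spec_is_catalog_query_py (query : String) (out : Bool) : Prop := out = is_catalog_query_py_alt query
instance (query : String) (out : Bool) : Decidable (Spec_is_catalog_query_py query out) := by unfold Spec_is_catalog_query_py; infer_instance

-- ===== CLAIM (what is proved, stated in full; the proofs are below) =====
def Claim_equal_is_catalog_query_py : Prop := ∀ (query : String), Dom_is_catalog_query_py query → Spec_is_catalog_query_py query (is_catalog_query_py query)

-- ===== LEMMAS AND PROOFS =====

def pvIndChars : List (List Char) := pvCatalogIndicators.map String.toList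

-- the table is exactly the indicator list, split at the first character
theorem pvLookup_mem (c : Char) (t : List Char) :
    (∃ ts, pvTailsByFirst.lookup c = some ts ∧ t ∈ ts) ↔ (c :: t) ∈ pvIndChars := by
  by_cases hP : c = 'P'
  · subst hP; simp [pvTailsByFirst, pvIndChars, pvCatalogIndicators]
  by_cases hI : c = 'I'
  · subst hI; simp [pvTailsByFirst, pvIndChars, pvCatalogIndicators, List.lookup]
  by_cases hC2 : c = ':'
  · subst hC2; simp [pvTailsByFirst, pvIndChars, pvCatalogIndicators, List.lookup]
  by_cases hC : c = 'C'
  · subst hC; simp [pvTailsByFirst, pvIndChars, pvCatalogIndicators, List.lookup]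
  by_cases hV : c = 'V'
  · subst hV; simp [pvTailsByFirst, pvIndChars, pvCatalogIndicators, List.lookup]
  by_cases hH : c = 'H'
  · subst hH; simp [pvTailsByFirst, pvIndChars, pvCatalogIndicators, List.lookup]
  · have bP : (c == 'P') = false := by simpa using hP
    have bI : (c == 'I') = false := by simpa using hI
    have bC2 : (c == ':') = false := by simpa using hC2
    have bC : (c == 'C') = false := by simpa using hC
    have bV : (c == 'V') = false := by simpa using hV
    have bH : (c == 'H') = false := by simpa using hH
    simp [pvTailsByFirst, pvIndChars, pvCatalogIndicators, List.lookup,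
      bP, bI, bC2, bC, bV, bH, hP, hI, hC2, hC, hV, hH]

theorem pvInd_ne_nil : ∀ p ∈ pvIndChars, p ≠ [] := by decide

-- the scan finds a match iff some indicator is an infix of the scanned list
theorem pvScanB_eq_true_iff (l : List Char) :
    pvScanB l = true ↔ ∃ p ∈ pvIndChars, p <:+: l := by
  induction l with
  | nil =>
    simp only [pvScanB, Bool.false_eq_true, false_iff]
    rintro ⟨p, hp, hinf⟩
    exact pvInd_ne_nil p hp (List.eq_nil_of_infix_nil hinf)
  | cons c rest ih =>
    have hstep : (∃ ts, pvTailsByFirst.lookup c = some ts ∧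
        ∃ t ∈ ts, t <+: rest) ↔ ∃ p ∈ pvIndChars, p <+: c :: rest := by
      constructor
      · rintro ⟨ts, hts, t, htm, hpre⟩
        exact ⟨c :: t, (pvLookup_mem c t).mp ⟨ts, hts, htm⟩,
          List.cons_prefix_cons.mpr ⟨rfl, hpre⟩⟩
      · rintro ⟨p, hp, hpre⟩
        cases p with
        | nil => exact absurd rfl (pvInd_ne_nil [] hp)
        | cons p0 pt =>
          rcases List.cons_prefix_cons.mp hpre with ⟨h0, hpre2⟩
          subst h0
          obtain ⟨ts, hts, htm⟩ := (pvLookup_mem p0 pt).mpr hp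
          exact ⟨ts, hts, pt, htm, hpre2⟩
    simp only [pvScanB]
    cases hlk : pvTailsByFirst.lookup c with
    | none =>
      show pvScanB rest = true ↔ _
      rw [hlk] at hstep
      rw [ih]
      constructor
      · rintro ⟨p, hp, hinf⟩; exact ⟨p, hp, List.infix_cons_iff.mpr (Or.inr hinf)⟩
      · rintro ⟨p, hp, hinf⟩
        rcases List.infix_cons_iff.mp hinf with hpre | hinf2
        · obtain ⟨ts, hts, -⟩ := hstep.mpr ⟨p, hp, hpre⟩
          cases hts
        · exact ⟨p, hp, hinf2⟩
    | some tails =>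
      show (if tails.any (fun t => PySem.Chars.startswith rest t) then true
            else pvScanB rest) = true ↔ _
      rw [hlk] at hstep
      split_ifs with hc
      · simp only [true_iff]
        simp only [List.any_eq_true, PySem.Chars.startswith_iff] at hc
        obtain ⟨t, htm, hpre⟩ := hc
        obtain ⟨p, hp, hpre2⟩ := hstep.mp ⟨tails, rfl, t, htm, hpre⟩
        exact ⟨p, hp, hpre2.isInfix⟩
      · rw [ih]
        simp only [List.any_eq_true, PySem.Chars.startswith_iff] at hc
        push Not at hc
        constructor
        · rintro ⟨p, hp, hinf⟩; exact ⟨p, hp, List.infix_cons_iff.mpr (Or.inr hinf)⟩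
        · rintro ⟨p, hp, hinf⟩
          rcases List.infix_cons_iff.mp hinf with hpre | hinf2
          · obtain ⟨ts, hts, t, htm, hpre2⟩ := hstep.mpr ⟨p, hp, hpre⟩
            cases hts
            exact absurd hpre2 (hc t htm)
          · exact ⟨p, hp, hinf2⟩

-- ===== VERDICT (by name: the statement is the Claim_ definition above) =====
theorem is_catalog_query_py_spec : Claim_equal_is_catalog_query_py := by
  intro query _
  unfold Spec_is_catalog_query_py is_catalog_query_py is_catalog_query_py_alt
  rw [Bool.eq_iff_iff, pvScanB_eq_true_iff]
  simp only [List.any_eq_true, PySem.Str.isIn_iff_infix, pvIndChars, List.mem_map]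
  constructor
  · rintro ⟨s, hs, hinf⟩; exact ⟨s.toList, ⟨s, hs, rfl⟩, hinf⟩
  · rintro ⟨p, ⟨s, hs, rfl⟩, hinf⟩; exact ⟨s, hs, hinf⟩
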